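-- pv_equiv track=rewrite | github.com/kylinlyy/hanlptensorflow | pre_data.py | join_pdf_text
-- ===== SOURCE A (Python) =====
-- def join_pdf_text(pdf_list):
--     #根据长度，不满足一行的，不和下一行合并
--     max_length=0
--     for pl in pdf_list:
--         lpl=len(pl)
--         if max_length<lpl:
--             max_length=lpl
--     result_list=[]
--     add_str = ""
--     for pl in pdf_list:
--         if len(pl)<max_length-3:
--             add_str+=pl
--             result_list.append(add_str)
--             add_str=""
--         else:
--             add_str+=pl
--     result_list.append(add_str)
--
--     return result_list
-- ===== SOURCE B (Python) =====
-- def join_pdf_text(pdf_list):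
--     max_length = max((len(pl) for pl in pdf_list), default=0)
--     cuts = [i for i, pl in enumerate(pdf_list) if len(pl) < max_length - 3]
--     result, start = [], 0
--     for b in cuts:
--         result.append(''.join(pdf_list[start:b + 1]))
--         start = b + 1
--     result.append(''.join(pdf_list[start:]))
--     return result
-- ===== Notes on version B (the rewrite author's own statement) =====
-- stated objective: alternative
-- what changed: replaces the accumulate-and-flush loop by a two-phase index-then-slice decomposition: first collect the boundary indices of short lines, then emit each group as the join of a slice of pdf_list
import Mathlib
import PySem

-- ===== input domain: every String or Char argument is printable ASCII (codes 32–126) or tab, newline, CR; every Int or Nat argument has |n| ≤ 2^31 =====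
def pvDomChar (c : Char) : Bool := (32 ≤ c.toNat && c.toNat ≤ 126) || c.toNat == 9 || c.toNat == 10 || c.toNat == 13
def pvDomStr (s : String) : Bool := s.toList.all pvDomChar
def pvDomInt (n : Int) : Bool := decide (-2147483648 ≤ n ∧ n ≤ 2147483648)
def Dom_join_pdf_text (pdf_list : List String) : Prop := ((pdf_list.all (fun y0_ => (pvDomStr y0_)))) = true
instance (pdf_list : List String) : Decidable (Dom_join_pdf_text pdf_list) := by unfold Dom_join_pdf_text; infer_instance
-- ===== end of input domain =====

-- B replaces A's accumulate-and-flush loop by a two-phase decomposition (collect cut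
-- indices, then join slices); same result, similar cost (objective: alternative).

-- ===== PORT A =====
def join_pdf_text (pdf_list : List String) : List String :=
  let max_length : Int :=
    pdf_list.foldl (fun ml pl =>
      let lpl := PySem.Str.len pl
      if ml < lpl then lpl else ml) 0
  let st := pdf_list.foldl (fun (st : List String × String) pl =>
      if PySem.Str.len pl < max_length - 3 then (st.1 ++ [st.2 ++ pl], "")
      else (st.1, st.2 ++ pl)) ([], "")
  st.1 ++ [st.2]

-- ===== PORT B =====
def join_pdf_text_alt (pdf_list : List String) : List String :=
  let max_length : Int := PySem.List.maxD (pdf_list.map PySem.Str.len) (fun x => x) 0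
  let cuts : List Int :=
    ((PySem.List.enumerate pdf_list).filter
      (fun p => PySem.Str.len p.2 < max_length - 3)).map (·.1)
  let st := cuts.foldl (fun (st : List String × Int) b =>
      (st.1 ++ [PySem.Str.join "" (PySem.List.slice pdf_list (some st.2) (some (b + 1)))],
       b + 1)) ([], 0)
  st.1 ++ [PySem.Str.join "" (PySem.List.slice pdf_list (some st.2) none)]

-- ===== PRECONDITION & SPEC =====
def Spec_join_pdf_text (pdf_list : List String) (out : List String) : Prop := out = join_pdf_text_alt pdf_list
instance (pdf_list : List String) (out : List String) : Decidable (Spec_join_pdf_text pdf_list out) := by unfold Spec_join_pdf_text; infer_instance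

-- ===== CLAIM (what is proved, stated in full; the proofs are below) =====
def Claim_equal_join_pdf_text : Prop := ∀ (pdf_list : List String), Dom_join_pdf_text pdf_list → Spec_join_pdf_text pdf_list (join_pdf_text pdf_list)

-- ===== LEMMAS AND PROOFS =====

/-- The common grouping function both loops compute: accumulate lines, closing a group
after every line shorter than the threshold `t`; the trailing group is always emitted. -/
def pvGroups (t : Int) : List String → String → List String
  | [], acc => [acc]
  | x :: xs, acc =>
      if PySem.Str.len x < t then (acc ++ x) :: pvGroups t xs ""
      else pvGroups t xs (acc ++ x)

lemma pvCharsJoin_append (l : List (List Char)) (x : List Char) :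
    PySem.Chars.join [] (l ++ [x]) = PySem.Chars.join [] l ++ x := by
  induction l with
  | nil => simp [PySem.Chars.join_nil, PySem.Chars.join_singleton]
  | cons a l ih =>
      cases l with
      | nil => simp [PySem.Chars.join_singleton, PySem.Chars.join_cons_cons]
      | cons b l =>
          rw [List.cons_append, List.cons_append, PySem.Chars.join_cons_cons,
            ← List.cons_append, ih, PySem.Chars.join_cons_cons]
          simp

lemma pvJoin_nil : PySem.Str.join "" ([] : List String) = "" := by
  apply String.toList_inj.mp
  simp [PySem.Str.join, PySem.Chars.join_nil]

lemma pvJoin_append (l : List String) (x : String) :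
    PySem.Str.join "" (l ++ [x]) = PySem.Str.join "" l ++ x := by
  apply String.toList_inj.mp
  simp only [PySem.Str.join, List.map_append, List.map_cons, List.map_nil]
  rw [show String.toList "" = [] by rfl, pvCharsJoin_append]
  simp

/-- A's main loop computes `pvGroups`. -/
lemma pvA_loop (t : Int) (xs : List String) (res : List String) (acc : String) :
    (xs.foldl (fun (st : List String × String) pl =>
        if PySem.Str.len pl < t then (st.1 ++ [st.2 ++ pl], "")
        else (st.1, st.2 ++ pl)) (res, acc)).1
      ++ [(xs.foldl (fun (st : List String × String) pl =>
        if PySem.Str.len pl < t then (st.1 ++ [st.2 ++ pl], "")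
        else (st.1, st.2 ++ pl)) (res, acc)).2]
    = res ++ pvGroups t xs acc := by
  induction xs generalizing res acc with
  | nil => simp [pvGroups]
  | cons x xs ih =>
      simp only [List.foldl_cons, pvGroups]
      by_cases h : PySem.Str.len x < t
      · rw [if_pos h, if_pos h, ih]; simp
      · rw [if_neg h, if_neg h, ih]

/-- Cut indices of `xs` enumerated from offset `k`, as in B. -/
def pvCuts (t : Int) (xs : List String) (k : Int) : List Int :=
  ((PySem.List.enumerate xs k).filter
    (fun p => PySem.Str.len p.2 < t)).map (·.1)

lemma pvCuts_nil (t k : Int) : pvCuts t [] k = [] := by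
  simp [pvCuts, PySem.List.enumerate_nil]

lemma pvCuts_cons (t k : Int) (x : String) (xs : List String) :
    pvCuts t (x :: xs) k =
      (if PySem.Str.len x < t then [k] else []) ++ pvCuts t xs (k + 1) := by
  by_cases h : PySem.Str.len x < t
  · simp only [pvCuts, PySem.List.enumerate_cons, List.filter_cons, decide_eq_true_eq,
      if_pos h, List.map_cons, List.singleton_append]
  · simp only [pvCuts, PySem.List.enumerate_cons, List.filter_cons, decide_eq_true_eq,
      if_neg h, List.nil_append]

/-- B's cut-walk over `full = pre ++ p ++ xs` (cuts of `xs` enumerated from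
`pre.length + p.length`, walk starting at index `pre.length`) appends
`pvGroups t xs (join p)` to the output so far. -/
lemma pvB_loop (t : Int) (full : List String) (xs p pre res : List String)
    (hfull : full = pre ++ p ++ xs) :
    ((pvCuts t xs ((pre.length : Int) + (p.length : Int))).foldl
        (fun (st : List String × Int) b =>
          (st.1 ++ [PySem.Str.join "" (PySem.List.slice full (some st.2) (some (b + 1)))],
           b + 1)) (res, (pre.length : Int))).1
      ++ [PySem.Str.join "" (PySem.List.slice full
            (some ((pvCuts t xs ((pre.length : Int) + (p.length : Int))).foldl
              (fun (st : List String × Int) b =>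
                (st.1 ++ [PySem.Str.join "" (PySem.List.slice full (some st.2) (some (b + 1)))],
                 b + 1)) (res, (pre.length : Int))).2) none)]
    = res ++ pvGroups t xs (PySem.Str.join "" p) := by
  induction xs generalizing p pre res with
  | nil =>
      rw [pvCuts_nil]
      simp only [List.foldl_nil]
      rw [PySem.List.slice_from_natCast, hfull]
      simp [pvGroups]
  | cons x xs ih =>
      rw [pvCuts_cons]
      by_cases h : PySem.Str.len x < t
      · rw [if_pos h]
        simp only [List.singleton_append, List.foldl_cons]
        have hslice : PySem.List.slice full (some (pre.length : Int))
            (some ((pre.length : Int) + (p.length : Int) + 1)) = p ++ [x] := by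
          have hc : (pre.length : Int) + (p.length : Int) + 1
              = (pre.length : Int) + ((p.length + 1 : Nat) : Int) := by push_cast; ring
          rw [hc, PySem.List.slice_natCast_add, hfull]
          rw [List.append_assoc, List.drop_left]
          rw [show p ++ x :: xs = (p ++ [x]) ++ xs by simp]
          rw [show p.length + 1 = (p ++ [x]).length by simp]
          exact List.take_left
        have hfull' : full = (pre ++ p ++ [x]) ++ [] ++ xs := by
          simp [hfull, List.append_assoc]
        have ih' := ih [] (pre ++ p ++ [x])
          (res ++ [PySem.Str.join "" (PySem.List.slice full (some (pre.length : Int))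
            (some ((pre.length : Int) + (p.length : Int) + 1)))]) hfull'
        simp only [List.length_append, List.length_nil, List.length_cons,
          Nat.cast_add, Nat.cast_zero, Nat.cast_one, add_zero, zero_add] at ih'
        rw [ih', hslice, pvJoin_append]
        simp only [pvGroups]
        rw [if_pos h, pvJoin_nil]
        simp
      · rw [if_neg h]
        simp only [List.nil_append]
        have hfull' : full = pre ++ (p ++ [x]) ++ xs := by
          simp [hfull, List.append_assoc]
        have ih' := ih (p ++ [x]) pre res hfull'
        simp only [List.length_append, List.length_cons, List.length_nil,
          Nat.cast_add, Nat.cast_zero, Nat.cast_one, zero_add, ← add_assoc] at ih'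
        rw [ih', pvJoin_append]
        simp only [pvGroups]
        rw [if_neg h]

/-- Pointwise: A's running-max step is `max`. -/
lemma pvMax_step (ml lpl : Int) : (if ml < lpl then lpl else ml) = max ml lpl := by
  split_ifs <;> omega

/-- B's `max(..., default=0)` equals A's running-max loop (lengths are nonnegative). -/
lemma pvMax_eq (l : List String) :
    PySem.List.maxD (l.map PySem.Str.len) (fun x => x) 0
      = l.foldl (fun ml pl =>
          let lpl := PySem.Str.len pl
          if ml < lpl then lpl else ml) 0 := by
  have hfold : l.foldl (fun ml pl =>
      let lpl := PySem.Str.len pl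
      if ml < lpl then lpl else ml) 0
      = (l.map PySem.Str.len).foldl (fun a b => max a b) 0 := by
    rw [List.foldl_map]
    congr 1
    funext ml pl
    exact pvMax_step ml (PySem.Str.len pl)
  rw [hfold]
  cases l with
  | nil => simp [PySem.List.maxD, PySem.List.max?]
  | cons s rest =>
      have h0 : (0 : Int) ≤ PySem.Str.len s := by
        rw [PySem.Str.len_eq]; positivity
      simp only [List.map_cons, List.foldl_cons]
      rw [PySem.List.maxD, PySem.List.max?_id_cons]
      simp [h0]

-- ===== VERDICT (by name: the statement is the Claim_ definition above) =====
theorem join_pdf_text_spec : Claim_equal_join_pdf_text := by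
  intro pdf_list _
  unfold Spec_join_pdf_text join_pdf_text join_pdf_text_alt
  rw [pvMax_eq]
  rw [pvA_loop]
  have hB := pvB_loop
    (pdf_list.foldl (fun ml pl =>
        let lpl := PySem.Str.len pl
        if ml < lpl then lpl else ml) 0 - 3)
    pdf_list pdf_list [] [] [] (by simp)
  simp only [pvCuts, List.length_nil, Nat.cast_zero, add_zero, List.nil_append,
    pvJoin_nil] at hB
  simp only [List.nil_append]
  exact hB.symm
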